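-- pv_equiv track=rewrite | github.com/PythoneerKang/VisionForecaster | extract_distance_matrices.py | get_gics_sector_boundaries
-- ===== SOURCE A (Python) =====
-- def get_gics_sector_boundaries(sector_labels: list[str]) -> list[tuple[str, int, int]]:
--     """
--     Given the per-stock sector_labels list returned by reorder_by_gics(),
--     compute the start and end index of each GICS sector block.
--
--     Returns
--     -------
--     list of (sector_name, start_idx, end_idx) tuples  (end_idx is exclusive)
--
--     Useful for drawing block-diagonal lines on heatmap visualisations, e.g.:
--         for name, start, end in get_gics_sector_boundaries(sectors):
--             ax.axhline(end - 0.5, color='white', lw=0.8)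
--             ax.axvline(end - 0.5, color='white', lw=0.8)
--     """
--     boundaries: list[tuple[str, int, int]] = []
--     current_sector = sector_labels[0]
--     start = 0
--     for i, s in enumerate(sector_labels[1:], start=1):
--         if s != current_sector:
--             boundaries.append((current_sector, start, i))
--             current_sector = s
--             start = i
--     boundaries.append((current_sector, start, len(sector_labels)))
--     return boundaries
-- ===== SOURCE B (Python) =====
-- def get_gics_sector_boundaries(sector_labels: list[str]) -> list[tuple[str, int, int]]:
--     n = len(sector_labels)
--     cuts = [0] + [i for i in range(1, n) if sector_labels[i] != sector_labels[i - 1]] + [n]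
--     return [(sector_labels[cuts[k]], cuts[k], cuts[k + 1])
--             for k in range(len(cuts) - 1)]
-- ===== Notes on version B (the rewrite author's own statement) =====
-- stated objective: alternative
-- what changed: B first computes the list of block cut points (indices where the label changes, plus 0 and n) and then forms the result by pairing consecutive cut points and reading each block's name from the labels list, instead of A's single stateful scan carrying current sector, start and a growing accumulator.
import Mathlib
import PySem

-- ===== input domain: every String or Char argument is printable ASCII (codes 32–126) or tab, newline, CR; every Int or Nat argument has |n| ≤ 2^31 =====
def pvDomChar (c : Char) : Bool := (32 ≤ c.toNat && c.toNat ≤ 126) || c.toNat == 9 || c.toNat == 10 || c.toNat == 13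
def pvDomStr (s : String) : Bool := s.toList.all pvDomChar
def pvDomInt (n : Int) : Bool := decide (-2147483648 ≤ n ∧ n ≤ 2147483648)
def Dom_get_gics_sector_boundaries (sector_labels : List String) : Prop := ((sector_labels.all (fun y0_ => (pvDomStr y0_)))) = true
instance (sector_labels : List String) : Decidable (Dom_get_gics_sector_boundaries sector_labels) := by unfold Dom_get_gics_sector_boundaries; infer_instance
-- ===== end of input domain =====

-- B replaces A's single stateful scan (current sector, start, accumulator) by a cut-point list
-- paired up in a second pass; same O(n) cost, purely a different decomposition (objective: alternative).

-- ===== PORT A =====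
-- A's loop body over enumerate(sector_labels[1:], start=1): state (boundaries, current_sector, start, i)
def astep (acc : List (String × Int × Int) × String × Int × Int) (s : String) :
    List (String × Int × Int) × String × Int × Int :=
  if s ≠ acc.2.1 then (acc.1 ++ [(acc.2.1, acc.2.2.1, acc.2.2.2)], s, acc.2.2.2, acc.2.2.2 + 1)
  else (acc.1, acc.2.1, acc.2.2.1, acc.2.2.2 + 1)

-- the [] branch is unreachable under Pre_ (Python raises IndexError on sector_labels[0])
def get_gics_sector_boundaries (sector_labels : List String) : List (String × Int × Int) :=
  match sector_labels with
  | [] => []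
  | l0 :: rest =>
    let st := rest.foldl astep ([], l0, 0, 1)
    st.1 ++ [(st.2.1, st.2.2.1, (sector_labels.length : Int))]

-- ===== PORT B =====
-- Source B's cuts list: range(1, n) is List.range' 1 (n-1); indexing sector_labels[i] for 0 ≤ i < n
-- is getD (exact in range; the "" default is only reachable for the empty list, excluded by Pre_).
def get_gics_sector_boundaries_alt (sector_labels : List String) : List (String × Int × Int) :=
  let n := sector_labels.length
  let cuts : List Nat :=
    0 :: (List.range' 1 (n - 1)).filter
          (fun i => sector_labels.getD i "" != sector_labels.getD (i - 1) "") ++ [n]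
  (List.range (cuts.length - 1)).map
    (fun k => (sector_labels.getD (cuts.getD k 0) "",
               (cuts.getD k 0 : Int), (cuts.getD (k + 1) 0 : Int)))

-- ===== PRECONDITION & SPEC =====
-- Pre_ excludes only the empty list, on which both A and B raise IndexError (sector_labels[0]).
def Pre_get_gics_sector_boundaries (sector_labels : List String) : Prop := sector_labels ≠ []
instance (sector_labels : List String) : Decidable (Pre_get_gics_sector_boundaries sector_labels) := by unfold Pre_get_gics_sector_boundaries; infer_instance
def pvWitness_get_gics_sector_boundaries : List String := ["Energy", "Energy", "Tech"]

def Spec_get_gics_sector_boundaries (sector_labels : List String) (out : List (String × Int × Int)) : Prop := out = get_gics_sector_boundaries_alt sector_labels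
instance (sector_labels : List String) (out : List (String × Int × Int)) : Decidable (Spec_get_gics_sector_boundaries sector_labels out) := by unfold Spec_get_gics_sector_boundaries; infer_instance

-- ===== CLAIM (what is proved, stated in full; the proofs are below) =====
def Claim_equal_get_gics_sector_boundaries : Prop := ∀ (sector_labels : List String), Dom_get_gics_sector_boundaries sector_labels → Pre_get_gics_sector_boundaries sector_labels → Spec_get_gics_sector_boundaries sector_labels (get_gics_sector_boundaries sector_labels)

-- ===== LEMMAS AND PROOFS =====

-- canonical recursive block decomposition both programs compute
def gblocks : String → Int → Int → List String → List (String × Int × Int)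
  | cur, start, i, [] => [(cur, start, i)]
  | cur, start, i, s :: rest =>
    if s ≠ cur then (cur, start, i) :: gblocks s i (i + 1) rest
    else gblocks cur start (i + 1) rest

-- pairing of consecutive cut points (B's second pass, in head/tail form)
def pairsL (labels : List String) : List Nat → List (String × Int × Int)
  | a :: b :: t => (labels.getD a "", (a : Int), (b : Int)) :: pairsL labels (b :: t)
  | _ => []

lemma A_loop (rest : List String) :
    ∀ (b : List (String × Int × Int)) (cur : String) (start i : Int),
    (rest.foldl astep (b, cur, start, i)).1
      ++ [((rest.foldl astep (b, cur, start, i)).2.1,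
           (rest.foldl astep (b, cur, start, i)).2.2.1, i + rest.length)]
    = b ++ gblocks cur start i rest := by
  induction rest with
  | nil => intro b cur start i; simp [gblocks]
  | cons s rest ih =>
    intro b cur start i
    simp only [List.foldl_cons, List.length_cons]
    push_cast
    rw [show i + ((rest.length : Int) + 1) = (i + 1) + rest.length by ring]
    by_cases h : s = cur
    · rw [show astep (b, cur, start, i) s = (b, cur, start, i + 1) by simp [astep, h]]
      rw [ih b cur start (i + 1)]
      simp [gblocks, h]
    · rw [show astep (b, cur, start, i) s = (b ++ [(cur, start, i)], s, i, i + 1) by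
        simp [astep, h]]
      rw [ih (b ++ [(cur, start, i)]) s i (i + 1)]
      simp [gblocks, h]

lemma pairs_map (labels : List String) (cs : List Nat) :
    (List.range (cs.length - 1)).map
      (fun k => (labels.getD (cs.getD k 0) "",
                 (cs.getD k 0 : Int), (cs.getD (k + 1) 0 : Int))) = pairsL labels cs := by
  induction cs with
  | nil => simp [pairsL]
  | cons a cs ih =>
    cases cs with
    | nil => simp [pairsL]
    | cons b t =>
      have hlen : (a :: b :: t).length - 1 = t.length + 1 := by simp
      rw [hlen, List.range_succ_eq_map, List.map_cons, List.map_map]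
      have hfun : ((fun k => (labels.getD ((a :: b :: t).getD k 0) "",
                 ((a :: b :: t).getD k 0 : Int), ((a :: b :: t).getD (k + 1) 0 : Int)))
              ∘ (· + 1))
           = (fun k => (labels.getD ((b :: t).getD k 0) "",
                 ((b :: t).getD k 0 : Int), ((b :: t).getD (k + 1) 0 : Int))) := by
        funext k; simp
      rw [hfun]
      have ht : (List.range ((b :: t).length - 1)).map
          (fun k => (labels.getD ((b :: t).getD k 0) "",
                 ((b :: t).getD k 0 : Int), ((b :: t).getD (k + 1) 0 : Int)))
          = pairsL labels (b :: t) := ih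
      simp only [List.length_cons, Nat.add_sub_cancel] at ht
      rw [ht, pairsL]
      simp

-- core: gblocks on the suffix at offset i equals the pairing of the cut points from i on
lemma gblocks_pairs (labels : List String) :
    ∀ (rest : List String) (i start : Nat) (cur : String),
    rest = labels.drop i → 1 ≤ i → i ≤ labels.length →
    labels.getD (i - 1) "" = cur → labels.getD start "" = cur →
    gblocks cur (start : Int) (i : Int) rest
      = pairsL labels (start :: (List.range' i (labels.length - i)).filter
          (fun j => labels.getD j "" != labels.getD (j - 1) "") ++ [labels.length]) := by
  intro rest
  induction rest with
  | nil =>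
    intro i start cur hdrop hi hile hprev hstart
    have hlen : labels.length ≤ i := by
      have h := List.drop_eq_nil_iff.mp hdrop.symm
      omega
    have hieq : i = labels.length := le_antisymm hile hlen
    subst hieq
    rw [List.getD_eq_getElem?_getD] at hstart
    simp [gblocks, pairsL]
    exact hstart.symm
  | cons s rest ih =>
    intro i start cur hdrop hi hile hprev hstart
    have hlt : i < labels.length := by
      by_contra hcon
      have hnil : labels.drop i = [] := List.drop_eq_nil_iff.mpr (by omega)
      rw [hnil] at hdrop
      exact List.cons_ne_nil _ _ hdrop
    have hgi : labels.getD i "" = s := by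
      have h0 : (labels.drop i)[0]? = labels[i + 0]? := List.getElem?_drop
      rw [← hdrop] at h0
      rw [Nat.add_zero] at h0
      rw [List.getD_eq_getElem?_getD, ← h0]
      rfl
    have hdrop' : rest = labels.drop (i + 1) := by
      have h1 : labels.drop (i + 1) = (labels.drop i).drop 1 := by
        rw [List.drop_drop]
      rw [h1, ← hdrop]
      rfl
    have hrange : List.range' i (labels.length - i)
        = i :: List.range' (i + 1) (labels.length - (i + 1)) := by
      have h2 : labels.length - i = (labels.length - (i + 1)) + 1 := by omega
      rw [h2, List.range'_succ]
    rw [hrange, List.filter_cons]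
    by_cases h : s = cur
    · rw [show (labels.getD i "" != labels.getD (i - 1) "") = false by
        rw [hgi, hprev]; simp [h]]
      simp only [Bool.false_eq_true, if_false]
      rw [show gblocks cur (start : Int) (i : Int) (s :: rest)
            = gblocks cur (start : Int) ((i : Int) + 1) rest by simp [gblocks, h]]
      have hrec := ih (i + 1) start cur hdrop' (by omega) (by omega)
        (by simp only [Nat.add_sub_cancel]; rw [hgi, h]) hstart
      push_cast at hrec
      exact hrec
    · rw [show (labels.getD i "" != labels.getD (i - 1) "") = true by
        rw [hgi, hprev]; simp [h]]
      simp only [if_true]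
      rw [show gblocks cur (start : Int) (i : Int) (s :: rest)
            = (cur, (start : Int), (i : Int)) :: gblocks s (i : Int) ((i : Int) + 1) rest by
        simp [gblocks, h]]
      have hrec := ih (i + 1) i s hdrop' (by omega) (by omega)
        (by simp only [Nat.add_sub_cancel]; exact hgi) hgi
      push_cast at hrec
      rw [hrec]
      rw [List.getD_eq_getElem?_getD] at hstart
      simp [pairsL]
      exact hstart.symm

lemma alt_eq_pairs (sector_labels : List String) :
    get_gics_sector_boundaries_alt sector_labels
      = pairsL sector_labels
          (0 :: (List.range' 1 (sector_labels.length - 1)).filter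
            (fun i => sector_labels.getD i "" != sector_labels.getD (i - 1) "")
            ++ [sector_labels.length]) := by
  unfold get_gics_sector_boundaries_alt
  exact pairs_map sector_labels _

-- ===== VERDICT (by name: the statement is the Claim_ definition above) =====
theorem get_gics_sector_boundaries_spec : Claim_equal_get_gics_sector_boundaries := by
  intro sector_labels _ hpre
  unfold Spec_get_gics_sector_boundaries
  cases sector_labels with
  | nil => exact absurd rfl hpre
  | cons l0 rest =>
    have hA : get_gics_sector_boundaries (l0 :: rest) = gblocks l0 0 1 rest := by
      have h := A_loop rest [] l0 0 1
      simp only [List.nil_append] at h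
      unfold get_gics_sector_boundaries
      dsimp only
      simp only [List.length_cons]
      push_cast
      rw [show ((rest.length : Int) + 1) = 1 + rest.length by ring]
      exact h
    have hG := gblocks_pairs (l0 :: rest) rest 1 0 l0 rfl le_rfl
      (by simp) rfl rfl
    push_cast at hG
    rw [hA, alt_eq_pairs]
    simpa using hG
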